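-- pv_equiv track=rewrite | github.com/frizynn/tp2-acso | TP2/src/bomb3/phase4.py | find_index_combinations
-- ===== SOURCE A (Python) =====
-- from itertools import product
--
-- array_values = [2, 13, 7, 14, 5, 10, 6, 15, 1, 12, 3, 4, 11, 8, 16, 9]
--
-- def find_index_combinations(num_combinations=10):
--     valid_combinations = []
--     # try all possible combinations of 6 indices (0-15)
--     for indices in product(range(16), repeat=6):
--         sum_values = sum(array_values[idx] for idx in indices)
--         if sum_values == 59:
--             valid_combinations.append(indices)
--             if len(valid_combinations) >= num_combinations:
--                 break
--     return valid_combinations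
-- ===== SOURCE B (Python) =====
-- array_values = [2, 13, 7, 14, 5, 10, 6, 15, 1, 12, 3, 4, 11, 8, 16, 9]
--
-- def find_index_combinations(num_combinations=10):
--     target = 59
--     lo, hi = min(array_values), max(array_values)
--     results = []
--     done = False
--
--     def dfs(prefix, total, remaining):
--         nonlocal done
--         if done:
--             return
--         if remaining == 0:
--             if total == target:
--                 results.append(prefix)
--                 if len(results) >= num_combinations:
--                     done = True
--             return
--         for idx in range(16):
--             t = total + array_values[idx]
--             if t + (remaining - 1) * lo <= target <= t + (remaining - 1) * hi:
--                 dfs(prefix + (idx,), t, remaining - 1)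
--                 if done:
--                     return
--
--     dfs((), 0, 6)
--     return results
-- ===== Notes on version B (the rewrite author's own statement) =====
-- stated objective: faster
-- what changed: Replaces the exhaustive scan of all 16^6 index tuples with a DFS backtracking search that carries the running sum and prunes any prefix whose remaining positions cannot reach the target 59 (min/max remaining-value bounds), stopping as soon as enough combinations are found.
import Mathlib
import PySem

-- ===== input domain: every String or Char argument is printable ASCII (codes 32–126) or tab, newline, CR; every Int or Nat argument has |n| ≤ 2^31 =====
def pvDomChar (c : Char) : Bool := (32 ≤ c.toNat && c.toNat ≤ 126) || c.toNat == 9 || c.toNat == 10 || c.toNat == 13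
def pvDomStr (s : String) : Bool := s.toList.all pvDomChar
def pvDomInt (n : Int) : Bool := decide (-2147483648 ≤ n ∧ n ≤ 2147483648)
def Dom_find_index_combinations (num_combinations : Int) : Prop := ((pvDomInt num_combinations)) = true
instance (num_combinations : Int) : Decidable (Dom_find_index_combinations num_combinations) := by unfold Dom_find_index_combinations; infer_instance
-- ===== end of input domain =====

-- B replaces A's exhaustive scan of all 16^6 index tuples by a pruned DFS over prefixes
-- (running sum + min/max remaining-value bounds) that stops once enough tuples are found.

-- ===== PORT A =====
-- module constant array_values (shared by both programs)
def pvArrayValues : List Int := [2, 13, 7, 14, 5, 10, 6, 15, 1, 12, 3, 4, 11, 8, 16, 9]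

-- array_values[idx]; every idx used below comes from range(16), so the lookup never misses
def pvVal (i : Int) : Int := PySem.List.pyGetD pvArrayValues i 0

-- sum(array_values[idx] for idx in indices)
def pvSumVals (t : List Int) : Int := (t.map pvVal).sum

-- return valid_combinations (first component of the loop state)
def pvFirst (s : List (List Int) × Bool) : List (List Int) := s.1

-- the for-loop over product(range(16), repeat=6) with break, written as 6 nested
-- index loops that propagate the break via a done flag (state = (valid_combinations, done))
def pvLoopA (n : Int) : Nat → List Int → List (List Int) × Bool → List (List Int) × Bool
  | 0, pref, s =>
      if s.2 then s
      else if pvSumVals pref = 59 then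
        let acc := s.1 ++ [pref]
        (acc, decide ((acc.length : Int) ≥ n))
      else s
  | k+1, pref, s =>
      if s.2 then s
      else (PySem.List.pyRange 0 16 1).foldl (fun s' i => pvLoopA n k (pref ++ [i]) s') s

def find_index_combinations (num_combinations : Int) : List (List Int) :=
  pvFirst (pvLoopA num_combinations 6 [] ([], false))

-- ===== PORT B =====
-- lo, hi = min(array_values), max(array_values)
def pvLo : Int := (PySem.List.min? pvArrayValues (fun x => x)).getD 0
def pvHi : Int := (PySem.List.max? pvArrayValues (fun x => x)).getD 0

-- dfs(prefix, total, remaining): backtracking with running sum, pruning any child whose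
-- remaining positions cannot reach 59; done flag stops the whole search once enough found
def pvDfs (n : Int) : Nat → List Int → Int → List (List Int) × Bool → List (List Int) × Bool
  | 0, pref, total, s =>
      if s.2 then s
      else if total = 59 then
        let res := s.1 ++ [pref]
        (res, decide ((res.length : Int) ≥ n))
      else s
  | r+1, pref, total, s =>
      (PySem.List.pyRange 0 16 1).foldl
        (fun s' idx =>
          if s'.2 then s'
          else
            let t := total + pvVal idx
            if t + (r : Int) * pvLo ≤ 59 ∧ 59 ≤ t + (r : Int) * pvHi then
              pvDfs n r (pref ++ [idx]) t s'
            else s') s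

def find_index_combinations_alt (num_combinations : Int) : List (List Int) :=
  pvFirst (pvDfs num_combinations 6 [] 0 ([], false))

-- ===== PRECONDITION & SPEC =====
def Spec_find_index_combinations (num_combinations : Int) (out : List (List Int)) : Prop := out = find_index_combinations_alt num_combinations
instance (num_combinations : Int) (out : List (List Int)) : Decidable (Spec_find_index_combinations num_combinations out) := by unfold Spec_find_index_combinations; infer_instance

-- ===== CLAIM (what is proved, stated in full; the proofs are below) =====
def Claim_equal_find_index_combinations : Prop := ∀ (num_combinations : Int), Dom_find_index_combinations num_combinations → Spec_find_index_combinations num_combinations (find_index_combinations num_combinations)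

-- ===== LEMMAS AND PROOFS =====

-- the lexicographically ordered list of all k-step extensions of a prefix
def pvTuples : Nat → List Int → List (List Int)
  | 0, p => [p]
  | k+1, p => (PySem.List.pyRange 0 16 1).flatMap (fun i => pvTuples k (p ++ [i]))

-- the common leaf step both programs perform on a complete tuple
def pvStep (n : Int) (s : List (List Int) × Bool) (t : List Int) : List (List Int) × Bool :=
  if s.2 then s
  else if pvSumVals t = 59 then
    let acc := s.1 ++ [t]
    (acc, decide ((acc.length : Int) ≥ n))
  else s

lemma pvStep_done {n : Int} {s : List (List Int) × Bool} (h : s.2 = true) (t : List Int) :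
    pvStep n s t = s := by simp [pvStep, h]

lemma pvStep_ne {n : Int} {s : List (List Int) × Bool} {t : List Int}
    (h : pvSumVals t ≠ 59) : pvStep n s t = s := by
  simp [pvStep, h]

lemma pvFoldl_done {n : Int} {s : List (List Int) × Bool} (h : s.2 = true)
    (l : List (List Int)) : l.foldl (pvStep n) s = s := by
  induction l with
  | nil => rfl
  | cons t ts ih => simp [List.foldl_cons, pvStep_done h, ih]

lemma pvFoldl_invalid {n : Int} (l : List (List Int)) (s : List (List Int) × Bool)
    (h : ∀ t ∈ l, pvSumVals t ≠ 59) : l.foldl (pvStep n) s = s := by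
  induction l generalizing s with
  | nil => rfl
  | cons t ts ih =>
      rw [List.foldl_cons, pvStep_ne (h t (by simp))]
      exact ih s (fun u hu => h u (by simp [hu]))

lemma pvFoldl2_done {α : Type} (g : α → List (List Int)) (n : Int)
    {s : List (List Int) × Bool} (hs : s.2 = true) (l : List α) :
    l.foldl (fun s' i => (g i).foldl (pvStep n) s') s = s := by
  induction l with
  | nil => rfl
  | cons i is ih => rw [List.foldl_cons, pvFoldl_done hs]; exact ih

lemma pvFoldl_flatMap {α : Type} (g : α → List (List Int)) (n : Int)
    (l : List α) (s : List (List Int) × Bool) :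
    (l.flatMap g).foldl (pvStep n) s = l.foldl (fun s' i => (g i).foldl (pvStep n) s') s := by
  induction l generalizing s with
  | nil => rfl
  | cons i is ih => simp [List.flatMap_cons, List.foldl_append, ih]

lemma pvValBound : ∀ i ∈ PySem.List.pyRange 0 16 1, 1 ≤ pvVal i ∧ pvVal i ≤ 16 := by decide

lemma pvSumVals_append (p : List Int) (i : Int) :
    pvSumVals (p ++ [i]) = pvSumVals p + pvVal i := by
  simp [pvSumVals]

lemma pvTuples_sum_bounds : ∀ (k : Nat) (p q : List Int), q ∈ pvTuples k p →
    pvSumVals p + (k : Int) ≤ pvSumVals q ∧ pvSumVals q ≤ pvSumVals p + 16 * (k : Int) := by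
  intro k
  induction k with
  | zero => intro p q hq; simp [pvTuples] at hq; subst hq; simp
  | succ k ih =>
      intro p q hq
      simp only [pvTuples, List.mem_flatMap] at hq
      obtain ⟨i, hi, hq⟩ := hq
      have hv := pvValBound i hi
      have hb := ih (p ++ [i]) q hq
      rw [pvSumVals_append] at hb
      push_cast
      omega

lemma pvLoopA_eq_fold (n : Int) : ∀ (k : Nat) (p : List Int) (s : List (List Int) × Bool),
    pvLoopA n k p s = (pvTuples k p).foldl (pvStep n) s := by
  intro k
  induction k with
  | zero => intro p s; rfl
  | succ k ih =>
      intro p s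
      rw [pvTuples, pvFoldl_flatMap]
      by_cases hs : s.2 = true
      · rw [pvLoopA, if_pos hs, pvFoldl2_done _ _ hs]
      · rw [pvLoopA, if_neg hs]
        simp only [ih]

lemma pvLo_eq : pvLo = 1 := by decide
lemma pvHi_eq : pvHi = 16 := by decide

lemma pvDfs_eq_fold (n : Int) : ∀ (k : Nat) (p : List Int) (total : Int)
    (s : List (List Int) × Bool), total = pvSumVals p →
    pvDfs n k p total s = (pvTuples k p).foldl (pvStep n) s := by
  intro k
  induction k with
  | zero => intro p total s ht; subst ht; rfl
  | succ k ih =>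
      intro p total s ht
      rw [pvTuples, pvFoldl_flatMap, pvDfs]
      refine PySem.List.foldl_congr_mem _ _ _ _ (fun s' i hi => ?_)
      by_cases hs : s'.2 = true
      · rw [if_pos hs, pvFoldl_done hs]
      · rw [if_neg hs]
        simp only [pvLo_eq, pvHi_eq]
        by_cases hp : total + pvVal i + (k : Int) * 1 ≤ 59 ∧ 59 ≤ total + pvVal i + (k : Int) * 16
        · rw [if_pos hp]
          exact ih (p ++ [i]) _ s' (by rw [pvSumVals_append, ht])
        · rw [if_neg hp]
          refine (pvFoldl_invalid _ s' (fun q hq => ?_)).symm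
          have hb := pvTuples_sum_bounds k (p ++ [i]) q hq
          rw [pvSumVals_append, ← ht] at hb
          intro h59; rw [h59] at hb
          omega

-- ===== VERDICT (by name: the statement is the Claim_ definition above) =====
theorem find_index_combinations_spec : Claim_equal_find_index_combinations := by
  intro n _
  show find_index_combinations n = find_index_combinations_alt n
  unfold find_index_combinations find_index_combinations_alt
  rw [pvLoopA_eq_fold n 6 [] ([], false), pvDfs_eq_fold n 6 [] 0 ([], false) rfl]
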